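-- pv_equiv track=rewrite | github.com/StephenYang232/Semantic-analysis-system-for-the-COVID19-epidemic | blueprints/qa.py | process_kwords
-- ===== SOURCE A (Python) =====
-- def process_kwords(kwords, syms):
--     patient = None
--     gender = None
--     age = None
--     place = []
--     cities = []
--     province = []
--     town = []
--     county = []
--     district = []
--     relation = None
--     rel_pat = None
--     onset_time = None
--     symptoms = []
--     track = []
--     for i in range(len(kwords)):
--         if syms[i]=='PAT'and patient==None:
--             patient=kwords[i]
--         elif syms[i]=='GEN':
--             gender=kwords[i]
--         elif syms[i]=='AGE':
--             age=kwords[i]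
--         elif syms[i]=='PLACE':
--             place.append(kwords[i])
--             track.append(kwords[i])
--         elif syms[i] == 'CITY':
--             cities.append(kwords[i])
--             track.append(kwords[i])
--         elif syms[i] == 'REL':
--             relation = kwords[i]
--         elif syms[i] == 'PAT'and patient!=None and rel_pat==None:
--             rel_pat = kwords[i]
--         elif syms[i] == 'DATE':
--             onset_time = kwords[i]
--         elif syms[i] == 'SYM':
--             symptoms.append(kwords[i])
--         elif syms[i] == 'PROVINCE':
--             province.append(kwords[i])
--             track.append(kwords[i])
--         elif syms[i] == 'COUNTY':
--             county.append(kwords[i])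
--             track.append(kwords[i])
--         elif syms[i] == 'TOWN':
--             town.append(kwords[i])
--             track.append(kwords[i])
--         elif syms[i] == 'DISTRCT':
--             district.append(kwords[i])
--             track.append(kwords[i])
--     place = ' '.join(place)
--     cities = ' '.join(cities)
--     symptoms = ' '.join(symptoms)
--     province = ' '.join(province)
--     county = ' '.join(county)
--     town = ' '.join(town)
--     district = ' '.join(district)
--     track = ' '.join(track)
--     kw = {'patient':patient,'age':age,'gender':gender,'place':place,'cities':cities,'province':province,'town':town,
--           'county':county,'district':district,'relation':relation,'rel_pat':rel_pat,'onset_time':onset_time,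
--           'symptoms':symptoms,'track':track}
--     for key,value in kw.items():
--         if value==' 'or value==None or len(value)==0:
--             kw[key]='未知'
--     return kw
-- ===== SOURCE B (Python) =====
-- def process_kwords(kwords, syms):
--     pairs = list(zip(kwords, syms))
--
--     def pick(sym):
--         return [w for w, s in pairs if s == sym]
--
--     def last(sym):
--         lst = pick(sym)
--         return lst[-1] if lst else None
--
--     pats = pick('PAT')
--     patient = pats[0] if pats else None
--     rel_pat = pats[1] if len(pats) > 1 else None
--
--     LOCS = ('PLACE', 'CITY', 'PROVINCE', 'COUNTY', 'TOWN', 'DISTRCT')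
--     kw = {
--         'patient': patient,
--         'age': last('AGE'),
--         'gender': last('GEN'),
--         'place': ' '.join(pick('PLACE')),
--         'cities': ' '.join(pick('CITY')),
--         'province': ' '.join(pick('PROVINCE')),
--         'town': ' '.join(pick('TOWN')),
--         'county': ' '.join(pick('COUNTY')),
--         'district': ' '.join(pick('DISTRCT')),
--         'relation': last('REL'),
--         'rel_pat': rel_pat,
--         'onset_time': last('DATE'),
--         'symptoms': ' '.join(pick('SYM')),
--         'track': ' '.join(w for w, s in pairs if s in LOCS),
--     }
--     return {k: ('未知' if v is None or v in ('', ' ') else v) for k, v in kw.items()}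
-- ===== Notes on version B (the rewrite author's own statement) =====
-- stated objective: simpler
-- what changed: Replaces the single index loop with its 14-field mutable state and if/elif dispatch by one filtered pass per category over zip(kwords, syms): each list field is a filter, scalars are first/second/last of their filtered list, track is one filtered scan over the six location labels.
import Mathlib
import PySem

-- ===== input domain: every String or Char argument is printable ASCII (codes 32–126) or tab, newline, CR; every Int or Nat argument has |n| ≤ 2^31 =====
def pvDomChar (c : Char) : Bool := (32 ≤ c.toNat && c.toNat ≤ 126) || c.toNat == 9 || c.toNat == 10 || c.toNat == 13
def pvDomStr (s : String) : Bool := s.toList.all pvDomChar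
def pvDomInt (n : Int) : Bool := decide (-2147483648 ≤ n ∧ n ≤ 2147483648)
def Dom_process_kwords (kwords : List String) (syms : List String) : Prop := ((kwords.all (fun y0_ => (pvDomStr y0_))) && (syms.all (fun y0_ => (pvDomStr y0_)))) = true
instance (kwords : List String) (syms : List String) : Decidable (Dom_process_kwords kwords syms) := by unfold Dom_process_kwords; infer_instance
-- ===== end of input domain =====

-- B replaces A's single index loop with 14-field mutable state by one filtered pass per
-- category over zip(kwords, syms) (simpler decomposition, same O(n) cost).


-- ===== PORT A =====
structure PvSt where
  patient : Option String
  gender : Option String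
  age : Option String
  place : List String
  cities : List String
  province : List String
  town : List String
  county : List String
  district : List String
  relation : Option String
  rel_pat : Option String
  onset_time : Option String
  symptoms : List String
  track : List String
deriving Repr, DecidableEq

def pvInit : PvSt := ⟨none, none, none, [], [], [], [], [], [], none, none, none, [], []⟩

-- A's if/elif chain, branch for branch
def pvStep (st : PvSt) (w s : String) : PvSt :=
  if s = "PAT" ∧ st.patient = none then { st with patient := some w }
  else if s = "GEN" then { st with gender := some w }
  else if s = "AGE" then { st with age := some w }
  else if s = "PLACE" then { st with place := st.place ++ [w], track := st.track ++ [w] }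
  else if s = "CITY" then { st with cities := st.cities ++ [w], track := st.track ++ [w] }
  else if s = "REL" then { st with relation := some w }
  else if s = "PAT" ∧ st.patient ≠ none ∧ st.rel_pat = none then { st with rel_pat := some w }
  else if s = "DATE" then { st with onset_time := some w }
  else if s = "SYM" then { st with symptoms := st.symptoms ++ [w] }
  else if s = "PROVINCE" then { st with province := st.province ++ [w], track := st.track ++ [w] }
  else if s = "COUNTY" then { st with county := st.county ++ [w], track := st.track ++ [w] }
  else if s = "TOWN" then { st with town := st.town ++ [w], track := st.track ++ [w] }
  else if s = "DISTRCT" then { st with district := st.district ++ [w], track := st.track ++ [w] }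
  else st

-- A's final normalization test 'value==" " or value==None or len(value)==0'
def pvNormA (v : Option String) : String :=
  match v with
  | none => "未知"
  | some t => if t = " " ∨ t = "" then "未知" else t

def pvJoin (l : List String) : String := PySem.Str.join " " l

def process_kwords (kwords : List String) (syms : List String) : List (String × String) :=
  -- syms.getD: Python's syms[i] raises IndexError when len(syms) < len(kwords); Pre_ excludes
  -- exactly those inputs, so on the admitted domain the default is never used and getD is exact
  let st := (List.range kwords.length).foldl
    (fun st i => pvStep st (kwords.getD i "") (syms.getD i "")) pvInit
  [("patient", pvNormA st.patient), ("age", pvNormA st.age), ("gender", pvNormA st.gender),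
   ("place", pvNormA (some (pvJoin st.place))), ("cities", pvNormA (some (pvJoin st.cities))),
   ("province", pvNormA (some (pvJoin st.province))), ("town", pvNormA (some (pvJoin st.town))),
   ("county", pvNormA (some (pvJoin st.county))), ("district", pvNormA (some (pvJoin st.district))),
   ("relation", pvNormA st.relation), ("rel_pat", pvNormA st.rel_pat),
   ("onset_time", pvNormA st.onset_time), ("symptoms", pvNormA (some (pvJoin st.symptoms))),
   ("track", pvNormA (some (pvJoin st.track)))]

-- ===== PORT B =====
def pvPick (pairs : List (String × String)) (sym : String) : List String :=
  (pairs.filter (fun p => p.2 == sym)).map Prod.fst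

def pvLast (pairs : List (String × String)) (sym : String) : Option String :=
  (pvPick pairs sym).getLast?

def pvLocs : List String := ["PLACE", "CITY", "PROVINCE", "COUNTY", "TOWN", "DISTRCT"]

-- B's comprehension test 'v is None or v in ("", " ")'
def pvNormB (v : Option String) : String :=
  match v with
  | none => "未知"
  | some t => if t = "" ∨ t = " " then "未知" else t

def process_kwords_alt (kwords : List String) (syms : List String) : List (String × String) :=
  let pairs := kwords.zip syms
  let pats := pvPick pairs "PAT"
  let track := (pairs.filter (fun p => pvLocs.contains p.2)).map Prod.fst
  [("patient", pvNormB pats.head?),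
   ("age", pvNormB (pvLast pairs "AGE")),
   ("gender", pvNormB (pvLast pairs "GEN")),
   ("place", pvNormB (some (pvJoin (pvPick pairs "PLACE")))),
   ("cities", pvNormB (some (pvJoin (pvPick pairs "CITY")))),
   ("province", pvNormB (some (pvJoin (pvPick pairs "PROVINCE")))),
   ("town", pvNormB (some (pvJoin (pvPick pairs "TOWN")))),
   ("county", pvNormB (some (pvJoin (pvPick pairs "COUNTY")))),
   ("district", pvNormB (some (pvJoin (pvPick pairs "DISTRCT")))),
   ("relation", pvNormB (pvLast pairs "REL")),
   ("rel_pat", pvNormB pats[1]?),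
   ("onset_time", pvNormB (pvLast pairs "DATE")),
   ("symptoms", pvNormB (some (pvJoin (pvPick pairs "SYM")))),
   ("track", pvNormB (some (pvJoin track)))]

-- ===== PRECONDITION & SPEC =====
-- Pre_ excludes exactly len(syms) < len(kwords): there A raises IndexError at syms[i]
-- (B's zip instead returns the dict built from the common prefix of the two lists).
def Pre_process_kwords (kwords : List String) (syms : List String) : Prop :=
  kwords.length ≤ syms.length
instance (kwords : List String) (syms : List String) : Decidable (Pre_process_kwords kwords syms) := by unfold Pre_process_kwords; infer_instance

def pvWitness_process_kwords : List String × List String :=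
  (["Zhang", "male", "30", "Wuhan"], ["PAT", "GEN", "AGE", "CITY"])

def Spec_process_kwords (kwords : List String) (syms : List String) (out : List (String × String)) : Prop := out = process_kwords_alt kwords syms
instance (kwords : List String) (syms : List String) (out : List (String × String)) : Decidable (Spec_process_kwords kwords syms out) := by unfold Spec_process_kwords; infer_instance

-- ===== CLAIM (what is proved, stated in full; the proofs are below) =====
def Claim_equal_process_kwords : Prop := ∀ (kwords : List String) (syms : List String), Dom_process_kwords kwords syms → Pre_process_kwords kwords syms → Spec_process_kwords kwords syms (process_kwords kwords syms)

-- ===== LEMMAS AND PROOFS =====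

-- B's per-category quantities, packed into A's state record
def pvS (l : List (String × String)) : PvSt :=
  { patient := (pvPick l "PAT").head?,
    gender := (pvPick l "GEN").getLast?,
    age := (pvPick l "AGE").getLast?,
    place := pvPick l "PLACE",
    cities := pvPick l "CITY",
    province := pvPick l "PROVINCE",
    town := pvPick l "TOWN",
    county := pvPick l "COUNTY",
    district := pvPick l "DISTRCT",
    relation := (pvPick l "REL").getLast?,
    rel_pat := (pvPick l "PAT")[1]?,
    onset_time := (pvPick l "DATE").getLast?,
    symptoms := pvPick l "SYM",
    track := (l.filter (fun p => pvLocs.contains p.2)).map Prod.fst }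

lemma pvPick_append (l : List (String × String)) (w s sym : String) :
    pvPick (l ++ [(w, s)]) sym = if s = sym then pvPick l sym ++ [w] else pvPick l sym := by
  by_cases h : s = sym <;> simp [pvPick, List.filter_append, h]

lemma pvStep_S (l : List (String × String)) (w s : String) :
    pvStep (pvS l) w s = pvS (l ++ [(w, s)]) := by
  by_cases h1 : s = "PAT"
  · subst h1
    rcases hp : pvPick l "PAT" with _ | ⟨a, _ | ⟨b, t2⟩⟩ <;>
      simp [pvStep, pvS, pvPick_append, pvLocs, hp]
  · by_cases h2 : s = "GEN"
    · subst h2; simp [pvStep, pvS, pvPick, pvLocs, List.filter_append]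
    · by_cases h3 : s = "AGE"
      · subst h3; simp [pvStep, pvS, pvPick, pvLocs, List.filter_append]
      · by_cases h4 : s = "PLACE"
        · subst h4; simp [pvStep, pvS, pvPick, pvLocs, List.filter_append]
        · by_cases h5 : s = "CITY"
          · subst h5; simp [pvStep, pvS, pvPick, pvLocs, List.filter_append]
          · by_cases h6 : s = "REL"
            · subst h6; simp [pvStep, pvS, pvPick, pvLocs, List.filter_append]
            · by_cases h7 : s = "DATE"
              · subst h7; simp [pvStep, pvS, pvPick, pvLocs, List.filter_append]
              · by_cases h8 : s = "SYM"
                · subst h8; simp [pvStep, pvS, pvPick, pvLocs, List.filter_append]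
                · by_cases h9 : s = "PROVINCE"
                  · subst h9; simp [pvStep, pvS, pvPick, pvLocs, List.filter_append]
                  · by_cases h10 : s = "COUNTY"
                    · subst h10; simp [pvStep, pvS, pvPick, pvLocs, List.filter_append]
                    · by_cases h11 : s = "TOWN"
                      · subst h11; simp [pvStep, pvS, pvPick, pvLocs, List.filter_append]
                      · by_cases h12 : s = "DISTRCT"
                        · subst h12; simp [pvStep, pvS, pvPick, pvLocs, List.filter_append]
                        · simp [pvStep, pvS, pvPick, pvLocs, List.filter_append, h1, h2, h3, h4, h5, h6, h7, h8, h9, h10, h11, h12]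

lemma pvFold_char (l : List (String × String)) :
    l.foldl (fun st p => pvStep st p.1 p.2) pvInit = pvS l := by
  induction l using List.reverseRecOn with
  | nil => rfl
  | append_singleton l p ih =>
    obtain ⟨w, s⟩ := p
    rw [List.foldl_append, ih]
    simpa using pvStep_S l w s

lemma pvRange_fold (kwords syms : List String) (init : PvSt)
    (h : kwords.length ≤ syms.length) :
    (List.range kwords.length).foldl
      (fun st i => pvStep st (kwords.getD i "") (syms.getD i "")) init
    = (kwords.zip syms).foldl (fun st p => pvStep st p.1 p.2) init := by
  induction kwords generalizing syms init with
  | nil => simp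
  | cons w ks ih =>
    cases syms with
    | nil => simp at h
    | cons s ss =>
      rw [List.length_cons, List.range_succ_eq_map]
      simp only [List.foldl_cons, List.foldl_map, List.getD_cons_succ, List.getD_cons_zero,
        List.zip_cons_cons]
      exact ih ss _ (by simpa using h)

lemma pvNorm_eq (v : Option String) : pvNormA v = pvNormB v := by
  cases v with
  | none => rfl
  | some t => simp [pvNormA, pvNormB, or_comm]

-- ===== VERDICT (by name: the statement is the Claim_ definition above) =====
theorem process_kwords_spec : Claim_equal_process_kwords := by
  intro kwords syms _dom hpre
  unfold Spec_process_kwords process_kwords process_kwords_alt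
  rw [pvRange_fold kwords syms pvInit hpre, pvFold_char]
  simp [pvS, pvNorm_eq, pvLast]
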